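-- pv_equiv track=rewrite | github.com/jdxxmahmud/Musa | Problem_Solving/class_47.py | rangeMaker
-- ===== SOURCE A (Python) =====
-- def rangeMaker (arr: int):
--     range_lst = [0, 0, 0, 0, 0, 0, 0, 0, 0, 0]
--     for j in arr:
--         if j <= 50:
--             if j <= 10:
--                 range_lst[0] += 1
--                 continue
--             elif j <= 20 and j >= 11:
--                 range_lst[1] += 1
--                 continue
--             elif j <= 30 and j >= 21:
--                 range_lst[2] += 1
--                 continue
--             elif j <= 40 and j >= 31:
--                 range_lst[3] += 1
--                 continue
--             else:
--                 range_lst[4] += 1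
--         else:
--             if j <= 60:
--                 range_lst[5] += 1
--                 continue
--             if j <= 70 and j >= 61:
--                 range_lst[6] += 1
--                 continue
--             if j <= 80 and j >= 71:
--                 range_lst[7] += 1
--                 continue
--             if j <= 90 and j >= 81:
--                 range_lst[8] += 1
--                 continue
--             else:
--                 range_lst[9] += 1
--
--     return f'''0 to 10 = {range_lst[0]}\n11 to 20 = {range_lst[1]}\n21 to 30 = {range_lst[2]}\n31 to 40 = {range_lst[3]}\n41 to 50 = {range_lst[4]}
-- 51 to 60 = {range_lst[5]}\n61 to 70 = {range_lst[6]}\n71 to 80 = {range_lst[7]}\n81 to 90 = {range_lst[8]}\n91 to 100 = {range_lst[9]}'''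
-- ===== SOURCE B (Python) =====
-- def rangeMaker(arr):
--     boundaries = [10, 20, 30, 40, 50, 60, 70, 80, 90]
--
--     def bisect_left(x):
--         lo, hi = 0, 9
--         while lo < hi:
--             mid = (lo + hi) // 2
--             if boundaries[mid] < x:
--                 lo = mid + 1
--             else:
--                 hi = mid
--         return lo
--
--     range_lst = [0] * 10
--     for j in arr:
--         range_lst[bisect_left(j)] += 1
--     return f'''0 to 10 = {range_lst[0]}\n11 to 20 = {range_lst[1]}\n21 to 30 = {range_lst[2]}\n31 to 40 = {range_lst[3]}\n41 to 50 = {range_lst[4]}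
-- 51 to 60 = {range_lst[5]}\n61 to 70 = {range_lst[6]}\n71 to 80 = {range_lst[7]}\n81 to 90 = {range_lst[8]}\n91 to 100 = {range_lst[9]}'''
-- ===== Notes on version B (the rewrite author's own statement) =====
-- stated objective: alternative
-- what changed: Replaces the nested if/elif comparison cascade with a binary search (bisect_left) over a precomputed boundary table to pick each element's bin in one uniform step.
import Mathlib
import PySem

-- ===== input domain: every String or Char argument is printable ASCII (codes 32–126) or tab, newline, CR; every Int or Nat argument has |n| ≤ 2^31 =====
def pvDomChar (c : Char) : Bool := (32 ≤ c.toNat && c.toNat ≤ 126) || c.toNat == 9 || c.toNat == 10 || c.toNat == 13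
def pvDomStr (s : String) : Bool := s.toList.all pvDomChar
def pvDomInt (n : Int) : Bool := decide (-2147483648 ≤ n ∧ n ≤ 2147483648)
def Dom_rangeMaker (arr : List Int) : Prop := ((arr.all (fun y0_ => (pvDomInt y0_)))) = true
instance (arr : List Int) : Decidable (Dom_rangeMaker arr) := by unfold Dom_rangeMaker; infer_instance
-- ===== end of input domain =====

-- B replaces A's nested if/elif cascade with a binary search over a boundary table; same counts, same output.

-- shared formatting of the final f-string (identical in both Pythons)
def pvFmt (r : List Int) : String :=
  "0 to 10 = " ++ PySem.Int.toStr (r.getD 0 0) ++ "\n11 to 20 = " ++ PySem.Int.toStr (r.getD 1 0) ++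
  "\n21 to 30 = " ++ PySem.Int.toStr (r.getD 2 0) ++ "\n31 to 40 = " ++ PySem.Int.toStr (r.getD 3 0) ++
  "\n41 to 50 = " ++ PySem.Int.toStr (r.getD 4 0) ++ "\n51 to 60 = " ++ PySem.Int.toStr (r.getD 5 0) ++
  "\n61 to 70 = " ++ PySem.Int.toStr (r.getD 6 0) ++ "\n71 to 80 = " ++ PySem.Int.toStr (r.getD 7 0) ++
  "\n81 to 90 = " ++ PySem.Int.toStr (r.getD 8 0) ++ "\n91 to 100 = " ++ PySem.Int.toStr (r.getD 9 0)

-- ===== PORT A =====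
-- loop body of A: the nested if/elif chain (continue makes the trailing ifs an elif chain)
def pvStepA (cnt : List Int) (j : Int) : List Int :=
  if j ≤ 50 then
    if j ≤ 10 then cnt.set 0 (cnt.getD 0 0 + 1)
    else if j ≤ 20 ∧ j ≥ 11 then cnt.set 1 (cnt.getD 1 0 + 1)
    else if j ≤ 30 ∧ j ≥ 21 then cnt.set 2 (cnt.getD 2 0 + 1)
    else if j ≤ 40 ∧ j ≥ 31 then cnt.set 3 (cnt.getD 3 0 + 1)
    else cnt.set 4 (cnt.getD 4 0 + 1)
  else
    if j ≤ 60 then cnt.set 5 (cnt.getD 5 0 + 1)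
    else if j ≤ 70 ∧ j ≥ 61 then cnt.set 6 (cnt.getD 6 0 + 1)
    else if j ≤ 80 ∧ j ≥ 71 then cnt.set 7 (cnt.getD 7 0 + 1)
    else if j ≤ 90 ∧ j ≥ 81 then cnt.set 8 (cnt.getD 8 0 + 1)
    else cnt.set 9 (cnt.getD 9 0 + 1)

def rangeMaker (arr : List Int) : String :=
  pvFmt (arr.foldl pvStepA [0, 0, 0, 0, 0, 0, 0, 0, 0, 0])

-- ===== PORT B =====
def pvBoundaries : List Int := [10, 20, 30, 40, 50, 60, 70, 80, 90]

-- B's hand-written bisect_left loop; the fuel argument (hi - lo steps suffice) only makes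
-- the same computation structurally recursive
def pvBLgo (x : Int) (lo hi fuel : Nat) : Nat :=
  match fuel with
  | 0 => lo
  | fuel + 1 =>
    if lo < hi then
      let mid := (lo + hi) / 2
      if pvBoundaries.getD mid 0 < x then pvBLgo x (mid + 1) hi fuel
      else pvBLgo x lo mid fuel
    else lo

def pvBisectLeft (x : Int) (lo hi : Nat) : Nat := pvBLgo x lo hi (hi - lo)

def rangeMaker_alt (arr : List Int) : String :=
  pvFmt (arr.foldl
    (fun cnt j => cnt.set (pvBisectLeft j 0 9) (cnt.getD (pvBisectLeft j 0 9) 0 + 1))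
    [0, 0, 0, 0, 0, 0, 0, 0, 0, 0])

-- ===== PRECONDITION & SPEC =====
def Spec_rangeMaker (arr : List Int) (out : String) : Prop := out = rangeMaker_alt arr
instance (arr : List Int) (out : String) : Decidable (Spec_rangeMaker arr out) := by unfold Spec_rangeMaker; infer_instance

-- ===== CLAIM (what is proved, stated in full; the proofs are below) =====
def Claim_equal_rangeMaker : Prop := ∀ (arr : List Int), Dom_rangeMaker arr → Spec_rangeMaker arr (rangeMaker arr)

-- ===== LEMMAS AND PROOFS =====

lemma pvBisectLeft_val (j : Int) :
    pvBisectLeft j 0 9 =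
      (if j ≤ 50 then
        if j ≤ 20 then (if j ≤ 10 then 0 else 1)
        else if j ≤ 30 then 2 else if j ≤ 40 then 3 else 4
      else
        if j ≤ 70 then (if j ≤ 60 then 5 else 6)
        else if j ≤ 80 then 7 else if j ≤ 90 then 8 else 9 : Nat) := by
  simp [pvBisectLeft, pvBLgo, pvBoundaries, List.getD]
  split_ifs <;> omega

lemma step_eq (cnt : List Int) (j : Int) :
    cnt.set (pvBisectLeft j 0 9) (cnt.getD (pvBisectLeft j 0 9) 0 + 1) = pvStepA cnt j := by
  rw [pvBisectLeft_val]
  unfold pvStepA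
  split_ifs <;> first | rfl | omega

lemma fold_eq (arr : List Int) (cnt : List Int) :
    arr.foldl
      (fun cnt j => cnt.set (pvBisectLeft j 0 9) (cnt.getD (pvBisectLeft j 0 9) 0 + 1)) cnt
    = arr.foldl pvStepA cnt := by
  have h : (fun cnt j => cnt.set (pvBisectLeft j 0 9) (cnt.getD (pvBisectLeft j 0 9) 0 + 1))
      = pvStepA := funext fun c => funext fun j => step_eq c j
  rw [h]

-- ===== VERDICT (by name: the statement is the Claim_ definition above) =====
theorem rangeMaker_spec : Claim_equal_rangeMaker := by
  intro arr _
  unfold Spec_rangeMaker rangeMaker rangeMaker_alt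
  rw [fold_eq]
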